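-- pv_equiv track=rewrite | github.com/nagata-ichiko/atcoder_Python | code/B.py | distance_between_points
-- ===== SOURCE A (Python) =====
-- def distance_between_points(p, q):
--     points = ['A', 'B', 'C', 'D', 'E', 'F', 'G']
--     distances = [3, 1, 4, 1, 5, 9]
--
--     # ポイント間の距離を計算
--     total_distances = [0]
--     for d in distances:
--         total_distances.append(total_distances[-1] + d)
--
--     # 入力された2つの点のインデックスを取得
--     p_index = points.index(p)
--     q_index = points.index(q)
--
--     # 2つの点間の距離を計算
--     return abs(total_distances[p_index] - total_distances[q_index])
-- ===== SOURCE B (Python) =====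
-- def distance_between_points(p, q):
--     points = ['A', 'B', 'C', 'D', 'E', 'F', 'G']
--     distances = [3, 1, 4, 1, 5, 9]
--     i = points.index(p)
--     j = points.index(q)
--     return sum(distances[min(i, j):max(i, j)])
-- ===== Notes on version B (the rewrite author's own statement) =====
-- stated objective: simpler
-- what changed: Drops the prefix-sum table and its subtraction/abs; B sums the distances slice between the two indices directly.
import Mathlib
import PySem

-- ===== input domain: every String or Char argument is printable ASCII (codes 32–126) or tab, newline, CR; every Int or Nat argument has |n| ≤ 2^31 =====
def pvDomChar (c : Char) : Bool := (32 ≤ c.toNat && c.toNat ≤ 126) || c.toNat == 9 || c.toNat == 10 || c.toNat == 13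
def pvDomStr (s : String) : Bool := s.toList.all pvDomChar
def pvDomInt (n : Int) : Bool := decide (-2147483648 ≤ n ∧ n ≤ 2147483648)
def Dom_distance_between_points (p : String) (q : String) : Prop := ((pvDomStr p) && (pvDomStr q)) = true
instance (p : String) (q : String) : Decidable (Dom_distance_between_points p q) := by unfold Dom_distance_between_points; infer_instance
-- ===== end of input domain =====

-- B drops A's prefix-sum table and its subtraction/abs and directly sums the
-- distances slice between the two looked-up indices (objective: simpler).

-- ===== PORT A =====
-- builds total_distances by appending running sums, then |total[p_i] - total[q_i]|
def distance_between_points (p : String) (q : String) : Int :=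
  let points : List String := ["A", "B", "C", "D", "E", "F", "G"]
  let distances : List Int := [3, 1, 4, 1, 5, 9]
  let total_distances : List Int :=
    distances.foldl (fun acc d => acc ++ [((PySem.List.pyGet? acc (-1)).getD 0) + d]) [0]
  match PySem.List.index? points p, PySem.List.index? points q with
  | some pi, some qi =>
      |((PySem.List.pyGet? total_distances (pi : Int)).getD 0)
        - ((PySem.List.pyGet? total_distances (qi : Int)).getD 0)|
  | _, _ => 0   -- unreachable under Pre_ (points.index raises ValueError in Python)

-- ===== PORT B =====
-- looks up both indices and sums the slice distances[min i j : max i j]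
def distance_between_points_alt (p : String) (q : String) : Int :=
  let points : List String := ["A", "B", "C", "D", "E", "F", "G"]
  let distances : List Int := [3, 1, 4, 1, 5, 9]
  ((PySem.List.index? points p).bind fun i =>
    (PySem.List.index? points q).map fun j =>
      (PySem.List.slice distances (some ((min i j : Nat) : Int)) (some ((max i j : Nat) : Int))).sum).getD 0
  -- getD's default is unreachable under Pre_ (points.index raises ValueError in Python)

-- ===== PRECONDITION & SPEC =====
-- Pre_ excludes exactly the inputs where Python's points.index raises ValueError
def Pre_distance_between_points (p : String) (q : String) : Prop :=
  p ∈ ["A", "B", "C", "D", "E", "F", "G"] ∧ q ∈ ["A", "B", "C", "D", "E", "F", "G"]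
instance (p : String) (q : String) : Decidable (Pre_distance_between_points p q) := by
  unfold Pre_distance_between_points; infer_instance

def pvWitness_distance_between_points : String × String := ("B", "E")

def Spec_distance_between_points (p : String) (q : String) (out : Int) : Prop := out = distance_between_points_alt p q
instance (p : String) (q : String) (out : Int) : Decidable (Spec_distance_between_points p q out) := by unfold Spec_distance_between_points; infer_instance

-- ===== CLAIM (what is proved, stated in full; the proofs are below) =====
def Claim_equal_distance_between_points : Prop := ∀ (p : String) (q : String), Dom_distance_between_points p q → Pre_distance_between_points p q → Spec_distance_between_points p q (distance_between_points p q)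

-- ===== LEMMAS AND PROOFS =====

-- ===== VERDICT (by name: the statement is the Claim_ definition above) =====
theorem distance_between_points_spec : Claim_equal_distance_between_points := by
  intro p q _ hpre
  obtain ⟨hp, hq⟩ := hpre
  fin_cases hp <;> fin_cases hq <;> decide
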